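-- pv_equiv track=rewrite | github.com/yujungle/Channel_Simulation | fangzhen/observer.py | observer_init
-- ===== SOURCE A (Python) =====
-- def observer_init(total_number):
--
--     if total_number >= 50:
--         mem_each_group = int(0.1 * float(total_number))
--         group = {}
--         for i in range(10):
--             group[i] = []
--         for i in range(10):
--             for j in range(mem_each_group):
--                 group[i].append(i*mem_each_group + j)
--
--     else:
--         group_number = int(float(total_number)//5)
--         group = {}
--         for i in range(group_number):
--             group[i] = []
--         for i in range(group_number):
--             for j in range(5):
--                 group[i].append(i*5 + j)
--     return group
-- ===== SOURCE B (Python) =====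
-- def observer_init(total_number):
--     if total_number >= 50:
--         ngroups, size = 10, int(0.1 * float(total_number))
--     else:
--         ngroups, size = int(float(total_number) // 5), 5
--     flat = list(range(ngroups * size))
--     return {i: flat[i * size:(i + 1) * size] for i in range(ngroups)}
-- ===== Notes on version B (the rewrite author's own statement) =====
-- stated objective: alternative
-- what changed: B computes (ngroups, size) per branch, builds one flat list(range(ngroups*size)) and slices it into consecutive chunks with a dict comprehension, instead of A's pre-seeded empty dict followed by nested loops appending i*size+j element by element.
import Mathlib
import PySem

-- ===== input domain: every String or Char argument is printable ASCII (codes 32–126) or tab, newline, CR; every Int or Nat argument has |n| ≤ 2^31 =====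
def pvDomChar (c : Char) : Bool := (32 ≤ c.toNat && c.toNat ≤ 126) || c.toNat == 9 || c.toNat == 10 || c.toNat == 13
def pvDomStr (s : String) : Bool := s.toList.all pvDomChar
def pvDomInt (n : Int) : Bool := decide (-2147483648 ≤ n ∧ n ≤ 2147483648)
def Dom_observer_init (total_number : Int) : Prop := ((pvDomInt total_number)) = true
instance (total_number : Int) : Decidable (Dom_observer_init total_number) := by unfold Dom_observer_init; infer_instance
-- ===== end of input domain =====

-- B re-decomposes A's nested append loops as build-then-chunk: one flat range sliced into groups
-- (objective: alternative decomposition, same cost). Both Pythons contain the expression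
-- int(0.1 * float(total_number)); it is ported once, exactly, as the shared helper pyTruncTenth below.

-- ===== PORT A =====
-- Exact port of Python's `int(0.1 * float(n))` for |n| ≤ 2^31: float(n) is exact there,
-- 0.1 is the double 3602879701896397/2^55, the product is rounded to nearest-even at 53
-- significant bits, and int() truncates toward zero. Implemented in exact integer arithmetic.
def pyTruncTenth (n : Int) : Int :=
  let p : Int := n * 3602879701896397
  let a : Nat := p.natAbs
  let mag : Nat :=
    if a < 2 ^ 53 then a >>> 55
    else
      let shift := (Nat.log2 a + 1) - 53
      let q := a >>> shift
      let r := a % 2 ^ shift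
      let half := 2 ^ (shift - 1)
      let q' := if half < r ∨ (r = half ∧ q % 2 = 1) then q + 1 else q
      (q' <<< shift) >>> 55
  if p < 0 then -(mag : Int) else (mag : Int)

def observer_init (total_number : Int) : List (Int × List Int) :=
  if 50 ≤ total_number then
    let mem_each_group : Int := pyTruncTenth total_number
    let group : PySem.Dict Int (List Int) :=
      (PySem.List.pyRange 0 10 1).foldl (fun d i => d.insert i ([] : List Int)) PySem.Dict.empty
    let group :=
      (PySem.List.pyRange 0 10 1).foldl (fun d i =>
        (PySem.List.pyRange 0 mem_each_group 1).foldl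
          (fun d j => d.modify i [] (fun xs => xs ++ [i * mem_each_group + j])) d) group
    group.items
  else
    -- int(float(n) // 5) is exact floor division for |n| ≤ 2^31 (the quotient is integral
    -- and far below 2^53), so it is ported as PySem.Int.floordiv.
    let group_number : Int := PySem.Int.floordiv total_number 5
    let group : PySem.Dict Int (List Int) :=
      (PySem.List.pyRange 0 group_number 1).foldl (fun d i => d.insert i ([] : List Int)) PySem.Dict.empty
    let group :=
      (PySem.List.pyRange 0 group_number 1).foldl (fun d i =>
        (PySem.List.pyRange 0 5 1).foldl
          (fun d j => d.modify i [] (fun xs => xs ++ [i * 5 + j])) d) group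
    group.items

-- ===== PORT B =====
def observer_init_alt (total_number : Int) : List (Int × List Int) :=
  let p : Int × Int :=
    if 50 ≤ total_number then (10, pyTruncTenth total_number)
    else (PySem.Int.floordiv total_number 5, 5)
  let ngroups := p.1
  let size := p.2
  let flat := PySem.List.pyRange 0 (ngroups * size) 1
  let group : PySem.Dict Int (List Int) :=
    (PySem.List.pyRange 0 ngroups 1).foldl
      (fun d i => d.insert i (PySem.List.slice flat (some (i * size)) (some ((i + 1) * size))))
      PySem.Dict.empty
  group.items

-- ===== PRECONDITION & SPEC =====
def Spec_observer_init (total_number : Int) (out : List (Int × List Int)) : Prop := out = observer_init_alt total_number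
instance (total_number : Int) (out : List (Int × List Int)) : Decidable (Spec_observer_init total_number out) := by unfold Spec_observer_init; infer_instance

-- ===== CLAIM (what is proved, stated in full; the proofs are below) =====
def Claim_equal_observer_init : Prop := ∀ (total_number : Int), Dom_observer_init total_number → Spec_observer_init total_number (observer_init total_number)

-- ===== LEMMAS AND PROOFS =====

theorem pyTruncTenth_nonneg (n : Int) (h : 0 ≤ n) : 0 ≤ pyTruncTenth n := by
  unfold pyTruncTenth
  have hp : ¬ (n * 3602879701896397 < 0) := not_lt.mpr (by positivity)
  simp only [hp, if_false]
  split <;> positivity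

-- Set.update is a no-op when every element is already present.
theorem set_update_noop (s : PySem.Set Int) (xs : List Int) (h : ∀ x ∈ xs, x ∈ s) :
    PySem.Set.update s xs = s := by
  induction xs generalizing s with
  | nil => rfl
  | cons x xs ih =>
    have hx : PySem.Set.add s x = s := by
      simp [PySem.Set.add, PySem.Set.contains, h x (by simp)]
    show PySem.Set.update (PySem.Set.add s x) xs = s
    rw [hx]
    exact ih s (fun y hy => h y (by simp [hy]))

theorem filter_flatMap_fst {α : Type} (xs : List Int) (f : Int → List α) (k : Int)
    (hnd : xs.Nodup) (hk : k ∈ xs) :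
    List.map (fun p => p.2)
      (List.filter (fun p => p.1 == k) (xs.flatMap (fun i => (f i).map (fun a => (i, a)))))
      = f k := by
  induction xs with
  | nil => cases hk
  | cons x xs ih =>
    rw [List.flatMap_cons, List.filter_append, List.map_append]
    rcases List.mem_cons.mp hk with hk | hk
    · subst hk
      have hnot : k ∉ xs := (List.nodup_cons.mp hnd).1
      have h1 : List.filter (fun p => p.1 == k) ((f k).map (fun a => (k, a)))
          = (f k).map (fun a => (k, a)) := by
        rw [List.filter_eq_self]; intro p hp
        rcases List.mem_map.mp hp with ⟨a, _, rfl⟩; simp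
      have h2 : List.filter (fun p => p.1 == k) (xs.flatMap (fun i => (f i).map (fun a => (i, a)))) = [] := by
        rw [List.filter_eq_nil_iff]; intro p hp
        rcases List.mem_flatMap.mp hp with ⟨i, hi, hpi⟩
        rcases List.mem_map.mp hpi with ⟨a, _, rfl⟩
        simp only [beq_iff_eq]; rintro rfl; exact hnot hi
      rw [h1, h2]; simp [List.map_map]
    · have hne : x ≠ k := by rintro rfl; exact (List.nodup_cons.mp hnd).1 hk
      have h1 : List.filter (fun p => p.1 == k) ((f x).map (fun a => (x, a))) = [] := by
        rw [List.filter_eq_nil_iff]; intro p hp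
        rcases List.mem_map.mp hp with ⟨a, _, rfl⟩
        simp [hne]
      rw [h1]
      simpa using ih (List.nodup_cons.mp hnd).2 hk

-- the chunk of the flat range [0, g*s) starting at i*s is exactly [i*s, i*s+s)
theorem slice_range_chunk (g s i : Int) (hs : 0 ≤ s) (hi0 : 0 ≤ i) (hig : i < g) :
    PySem.List.slice (PySem.List.pyRange 0 (g * s) 1) (some (i * s)) (some ((i + 1) * s))
      = (PySem.List.pyRange 0 s 1).map (fun j => i * s + j) := by
  have ha : (0:Int) ≤ i * s := by positivity
  have hab : i * s ≤ (i + 1) * s := by nlinarith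
  have hbg : (i + 1) * s ≤ g * s := by nlinarith
  have hb : (0:Int) ≤ (i + 1) * s := le_trans ha hab
  rw [PySem.List.slice_toNat _ ha hb]
  rw [PySem.List.pyRange_one_append 0 (i * s) (g * s) ha (le_trans hab hbg),
      PySem.List.pyRange_one_append (i * s) ((i + 1) * s) (g * s) hab hbg]
  have hlen1 : (PySem.List.pyRange 0 (i * s) 1).length = (i * s).toNat := by
    rw [PySem.List.length_pyRange_one]; omega
  rw [List.drop_left' hlen1]
  have hlen2 : (PySem.List.pyRange (i * s) ((i + 1) * s) 1).length = ((i + 1) * s).toNat - (i * s).toNat := by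
    rw [PySem.List.length_pyRange_one]
    have : (i + 1) * s - i * s = s := by ring
    omega
  rw [List.take_left' hlen2]
  rw [PySem.List.pyRange_one (i * s) ((i + 1) * s), PySem.List.pyRange_one 0 s]
  have : (i + 1) * s - i * s = s := by ring
  rw [this]
  simp [List.map_map, Function.comp_def]

-- main structural lemma: A's init-then-append build equals B's build-then-chunk build
theorem build_eq (g s : Int) (hs : 0 ≤ s) :
    ((PySem.List.pyRange 0 g 1).foldl (fun d i =>
        (PySem.List.pyRange 0 s 1).foldl
          (fun d j => d.modify i [] (fun xs => xs ++ [i * s + j])) d)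
      ((PySem.List.pyRange 0 g 1).foldl (fun d i => d.insert i ([] : List Int)) PySem.Dict.empty)).items
    = ((PySem.List.pyRange 0 g 1).foldl
        (fun d i => d.insert i (PySem.List.slice (PySem.List.pyRange 0 (g * s) 1)
          (some (i * s)) (some ((i + 1) * s)))) PySem.Dict.empty).items := by
  -- B side
  have hBfresh : ∀ a ∈ PySem.List.pyRange 0 g 1,
      (PySem.Dict.empty : PySem.Dict Int (List Int)).contains (id a) = false := by
    intro a _; simp [PySem.Dict.contains_empty]
  have hB := PySem.Dict.items_foldl_insert_fresh (PySem.List.pyRange 0 g 1) id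
      (fun i => PySem.List.slice (PySem.List.pyRange 0 (g * s) 1) (some (i * s)) (some ((i + 1) * s)))
      PySem.Dict.empty hBfresh (by simpa using PySem.List.nodup_pyRange_one 0 g)
  simp only [id] at hB
  rw [hB, show (PySem.Dict.empty : PySem.Dict Int (List Int)).items = [] from rfl, List.nil_append]
  -- A side, phase 1: the dict of empty lists
  have hA0 := PySem.Dict.items_foldl_insert_fresh (PySem.List.pyRange 0 g 1) id
      (fun _ => ([] : List Int)) PySem.Dict.empty hBfresh (by simpa using PySem.List.nodup_pyRange_one 0 g)
  simp only [id] at hA0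
  set d0 : PySem.Dict Int (List Int) :=
    (PySem.List.pyRange 0 g 1).foldl (fun d i => d.insert i ([] : List Int)) PySem.Dict.empty with hd0
  have hd0items : d0.items = (PySem.List.pyRange 0 g 1).map (fun i => (i, ([] : List Int))) := by
    rw [hd0, hA0, show (PySem.Dict.empty : PySem.Dict Int (List Int)).items = [] from rfl,
      List.nil_append]
  have hd0keys : d0.keys = PySem.List.pyRange 0 g 1 := by
    have hc : ((fun p : Int × List Int => p.1) ∘ fun i => (i, ([] : List Int))) = id := rfl
    simp only [PySem.Dict.keys, hd0items, List.map_map, hc, List.map_id]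
  -- A side, phase 2: flatten the two nested loops into one fold over (key, value) pairs
  have hflat :
      (PySem.List.pyRange 0 g 1).foldl (fun d i =>
          (PySem.List.pyRange 0 s 1).foldl
            (fun d j => d.modify i [] (fun xs => xs ++ [i * s + j])) d) d0
      = ((PySem.List.pyRange 0 g 1).flatMap
            (fun i => (PySem.List.pyRange 0 s 1).map (fun j => (i, i * s + j)))).foldl
          (fun d p => d.modify p.1 [] (fun xs => xs ++ [p.2])) d0 := by
    rw [List.foldl_flatMap]
    refine PySem.List.foldl_congr_mem _ _ _ _ ?_
    intro acc i _
    rw [List.foldl_map]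
  rw [hflat]
  set l := (PySem.List.pyRange 0 g 1).flatMap
      (fun i => (PySem.List.pyRange 0 s 1).map (fun j => (i, i * s + j))) with hl
  set dA := l.foldl (fun d p => d.modify p.1 [] (fun xs => xs ++ [p.2])) d0 with hdA
  have hmapfst : l.map (fun p => p.1) = (PySem.List.pyRange 0 g 1).flatMap
      (fun i => List.replicate (PySem.List.pyRange 0 s 1).length i) := by
    simp [hl, List.map_flatMap, List.map_map, Function.comp_def]
  have hkeys : dA.keys = PySem.List.pyRange 0 g 1 := by
    rw [hdA]
    rw [PySem.Dict.keys_foldl_modify_key l (fun p => p.1) [] (fun _ p xs => xs ++ [p.2]) d0]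
    rw [hd0keys]
    apply set_update_noop
    intro x hx
    rw [hmapfst] at hx
    rcases List.mem_flatMap.mp hx with ⟨i, hi, hxi⟩
    rcases List.eq_of_mem_replicate hxi with rfl
    exact hi
  have hnd : dA.keys.Nodup := by rw [hkeys]; exact PySem.List.nodup_pyRange_one 0 g
  rw [PySem.Dict.items_eq_map_keys dA hnd [], hkeys]
  apply List.map_congr_left
  intro i hi
  have hgetD : dA.getD i [] = (PySem.List.pyRange 0 s 1).map (fun j => i * s + j) := by
    rw [hdA, PySem.Dict.getD_foldl_modify_append]
    have hd0getD : d0.getD i [] = [] := by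
      apply PySem.Dict.getD_of_mem_items d0 (v := ([] : List Int))
      · rw [hd0items]; exact List.mem_map.mpr ⟨i, hi, rfl⟩
      · rw [hd0keys]; exact PySem.List.nodup_pyRange_one 0 g
    rw [hd0getD, List.nil_append, hl]
    have hff := filter_flatMap_fst (PySem.List.pyRange 0 g 1)
      (fun i => (PySem.List.pyRange 0 s 1).map (fun j => i * s + j)) i
      (PySem.List.nodup_pyRange_one 0 g) hi
    simpa [List.map_map, Function.comp_def] using hff
  rw [hgetD]
  have hmem := (PySem.List.mem_pyRange_one).mp hi
  rw [slice_range_chunk g s i hs hmem.1 hmem.2]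

-- ===== VERDICT (by name: the statement is the Claim_ definition above) =====
theorem observer_init_spec : Claim_equal_observer_init := by
  intro t _
  unfold Spec_observer_init observer_init observer_init_alt
  by_cases h : 50 ≤ t
  · simp only [h, if_true]
    exact build_eq 10 (pyTruncTenth t) (pyTruncTenth_nonneg t (by omega))
  · simp only [h, if_false]
    exact build_eq (PySem.Int.floordiv t 5) 5 (by norm_num)
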